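-- pv_equiv track=rewrite | github.com/6210qwe/leetcode_py | leetcode_solutions/by_id/q1356.py | min_moves_to_palindrome
-- ===== SOURCE A (Python) =====
-- def min_moves_to_palindrome(s: str) -> int:
--     """
--     函数式接口 - 返回将 s 变成回文串的最少操作次数
--     """
--     def find_next_char(s: str, start: int, end: int, char: str) -> int:
--         for i in range(end, start - 1, -1):
--             if s[i] == char:
--                 return i
--         return -1
--
--     n = len(s)
--     moves = 0
--     left, right = 0, n - 1
--
--     while left < right:
--         if s[left] == s[right]:
--             left += 1
--             right -= 1
--         else:
--             next_right = find_next_char(s, left, right, s[left])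
--             if next_right == -1:
--                 # 如果找不到相同的字符，说明已经处理完所有字符
--                 break
--             else:
--                 # 将 right 指向的字符移到合适的位置
--                 for j in range(next_right, right):
--                     s = s[:j] + s[j + 1] + s[j] + s[j + 2:]
--                     moves += 1
--                 right -= 1
--
--     return moves
-- ===== SOURCE B (Python) =====
-- def min_moves_to_palindrome(s: str) -> int:
--     # Shrinking-list reformulation: instead of two pointers into a string that is
--     # rebuilt one adjacent swap at a time, keep only the active window as a list,
--     # charge each displaced character its whole shift distance in one arithmetic
--     # step, and delete it once.
--     chars = list(s)
--     moves = 0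
--     while len(chars) > 1:
--         if chars[0] == chars[-1]:
--             chars = chars[1:-1]
--         else:
--             k = len(chars) - 1 - chars[::-1].index(chars[0])
--             moves += len(chars) - 1 - k
--             del chars[k]
--     return moves
-- ===== Notes on version B (the rewrite author's own statement) =====
-- stated objective: faster
-- what changed: A keeps two pointers into the full string and performs each character move as a chain of adjacent swaps, rebuilding the whole string per swap (O(n^3)); B keeps only the active window as a shrinking list, finds the partner with reversed().index, charges the whole shift distance arithmetically in one step and deletes the character once (O(n^2)).
import Mathlib
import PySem

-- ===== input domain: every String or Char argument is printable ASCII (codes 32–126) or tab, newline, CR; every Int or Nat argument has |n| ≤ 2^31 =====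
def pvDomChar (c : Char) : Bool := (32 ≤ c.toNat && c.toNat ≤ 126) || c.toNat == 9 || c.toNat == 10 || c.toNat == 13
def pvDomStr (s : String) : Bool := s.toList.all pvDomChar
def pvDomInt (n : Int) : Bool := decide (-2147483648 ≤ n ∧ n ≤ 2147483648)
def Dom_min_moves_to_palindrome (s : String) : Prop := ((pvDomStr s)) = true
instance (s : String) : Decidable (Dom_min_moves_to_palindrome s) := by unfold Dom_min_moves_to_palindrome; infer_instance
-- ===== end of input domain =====

-- B replaces A's swap-by-swap string rebuilding with a shrinking window list and a
-- closed-form shift cost per displaced character (objective: faster; same return value).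

-- ===== PORT A =====
-- find_next_char: scan i from `end` down to `start`; first i with s[i] == char, else -1.
-- (All indexings A performs are in range, so pyGetD's default is never consulted.)
def pvFindAux (cs : List Char) (c : Char) : List Int → Int
  | [] => -1
  | i :: rest => if PySem.List.pyGetD cs i ' ' == c then i else pvFindAux cs c rest

def pvFindNextChar (cs : List Char) (start end_ : Int) (c : Char) : Int :=
  pvFindAux cs c (PySem.List.pyRange end_ (start - 1) (-1))

-- inner loop body: s = s[:j] + s[j+1] + s[j] + s[j+2:]; moves += 1
def pvBubbleStep (p : List Char × Int) (j : Int) : List Char × Int :=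
  (PySem.List.slice p.1 none (some j) ++ [PySem.List.pyGetD p.1 (j + 1) ' ']
     ++ [PySem.List.pyGetD p.1 j ' '] ++ PySem.List.slice p.1 (some (j + 2)) none,
   p.2 + 1)

-- the while-loop of A (state: current string, moves, left, right)
def pvLoopA (cs : List Char) (moves left right : Int) : Int :=
  if _h : left < right then
    if PySem.List.pyGetD cs left ' ' == PySem.List.pyGetD cs right ' ' then
      pvLoopA cs moves (left + 1) (right - 1)
    else
      let nextRight := pvFindNextChar cs left right (PySem.List.pyGetD cs left ' ')
      if nextRight == -1 then moves
      else
        let st := (PySem.List.pyRange nextRight right 1).foldl pvBubbleStep (cs, moves)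
        pvLoopA st.1 st.2 left (right - 1)
  else moves
termination_by (right - left).toNat
decreasing_by all_goals omega

def min_moves_to_palindrome (s : String) : Int :=
  pvLoopA s.toList 0 0 (PySem.Str.len s - 1)

-- ===== PORT B =====
-- the while-loop of B (state: current window as a list, moves)
-- chars[::-1] is ported as List.reverse (PySem.List.slice?_none_none_neg_one).
def pvLoopB (chars : List Char) (moves : Int) : Int :=
  if _h : 1 < chars.length then
    if PySem.List.pyGetD chars 0 ' ' == PySem.List.pyGetD chars (-1) ' ' then
      pvLoopB (PySem.List.slice chars (some 1) (some (-1))) moves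
    else
      match _hi : PySem.List.index? chars.reverse (PySem.List.pyGetD chars 0 ' ') with
      | none => moves   -- unreachable: chars[0] occurs in chars (Python would raise ValueError)
      | some i =>
        let k : Int := PySem.List.len chars - 1 - (i : Int)
        match _hp : PySem.List.pop? chars k with
        | none => moves  -- unreachable: 0 ≤ k < len chars
        | some r => pvLoopB r.2 (moves + (PySem.List.len chars - 1 - k))
  else moves
termination_by chars.length
decreasing_by
  · have := PySem.List.length_slice chars 1 (-1)
    simp only [PySem.List.clampIdx] at this
    norm_num at this
    split_ifs at this with hnil
    · subst hnil; simp_all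
    · omega
  · have := PySem.List.length_of_pop?_eq_some chars _hp; omega

def min_moves_to_palindrome_alt (s : String) : Int :=
  pvLoopB s.toList 0

-- ===== PRECONDITION & SPEC =====
def Spec_min_moves_to_palindrome (s : String) (out : Int) : Prop := out = min_moves_to_palindrome_alt s
instance (s : String) (out : Int) : Decidable (Spec_min_moves_to_palindrome s out) := by unfold Spec_min_moves_to_palindrome; infer_instance

-- ===== CLAIM (what is proved, stated in full; the proofs are below) =====
def Claim_equal_min_moves_to_palindrome : Prop := ∀ (s : String), Dom_min_moves_to_palindrome s → Spec_min_moves_to_palindrome s (min_moves_to_palindrome s)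

-- ===== LEMMAS AND PROOFS =====
-- ---- helper lemmas for the proof ----

-- B's loop returns immediately on windows of length ≤ 1
theorem pvLoopB_small (chars : List Char) (m : Int) (h : chars.length ≤ 1) :
    pvLoopB chars m = m := by
  rw [pvLoopB]
  simp only [dif_neg (by omega : ¬ 1 < chars.length)]

-- one unfolding of A's descending scan
theorem pvFindNextChar_step (cs : List Char) (c : Char) (l r : Int) (h : l ≤ r) :
    pvFindNextChar cs l r c =
      if PySem.List.pyGetD cs r ' ' == c then r else pvFindNextChar cs l (r - 1) c := by
  unfold pvFindNextChar
  rw [PySem.List.pyRange_neg_one_cons (by omega : l - 1 < r)]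
  rfl

-- the scan hits at its first probe when cs[r] = c
theorem pvFindNextChar_self (cs : List Char) (c : Char) (l r : Int) (h : l ≤ r)
    (h0 : 0 ≤ l) (hlt : r.toNat < cs.length) (hcc : cs[r.toNat] = c) :
    pvFindNextChar cs l r c = (r.toNat : Int) := by
  rw [pvFindNextChar_step cs c l r h,
      PySem.List.pyGetD_of_nonneg cs ' ' (by omega), List.getD_eq_getElem cs ' ' hlt, hcc]
  rw [if_pos (by simp)]
  omega

-- find_next_char finds the LARGEST index in [l, r] holding c (given that cs[l] = c)
theorem pvFind_spec (cs : List Char) (c : Char) (l : Int) (h0 : 0 ≤ l) :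
    ∀ (n : Nat) (r : Int), (r - l).toNat = n → l ≤ r → r < cs.length → cs[l.toNat]? = some c →
    ∃ kn : Nat, pvFindNextChar cs l r c = (kn : Int) ∧ l ≤ (kn : Int) ∧ (kn : Int) ≤ r ∧
      cs[kn]? = some c ∧ ∀ j : Nat, kn < j → (j : Int) ≤ r → cs[j]? ≠ some c := by
  intro n
  induction n with
  | zero =>
    intro r hn hlr hrlen hc
    have hrl : r = l := by omega
    subst hrl
    have hlt : r.toNat < cs.length := by omega
    have hcc : cs[r.toNat] = c := by
      rw [List.getElem?_eq_getElem hlt] at hc; exact Option.some.inj hc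
    exact ⟨r.toNat, pvFindNextChar_self cs c r r le_rfl h0 hlt hcc, by omega, by omega, hc,
      by omega⟩
  | succ n ih =>
    intro r hn hlr hrlen hc
    have hrn : r.toNat < cs.length := by omega
    by_cases hrl : r = l
    · subst hrl
      have hcc : cs[r.toNat] = c := by
        rw [List.getElem?_eq_getElem hrn] at hc; exact Option.some.inj hc
      exact ⟨r.toNat, pvFindNextChar_self cs c r r le_rfl h0 hrn hcc, by omega, by omega, hc,
        by omega⟩
    · have hlr' : l < r := by omega
      by_cases hec : cs[r.toNat] = c
      · refine ⟨r.toNat, pvFindNextChar_self cs c l r (by omega) h0 hrn hec, by omega, by omega,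
          ?_, by omega⟩
        rw [List.getElem?_eq_getElem hrn, hec]
      · rw [pvFindNextChar_step cs c l r (by omega),
            PySem.List.pyGetD_of_nonneg cs ' ' (by omega), List.getD_eq_getElem cs ' ' hrn]
        rw [if_neg (by simp [hec])]
        obtain ⟨kn, heq, hk1, hk2, hk3, hk4⟩ := ih (r - 1) (by omega) (by omega) (by omega) hc
        refine ⟨kn, heq, hk1, by omega, hk3, ?_⟩
        intro j hj1 hj2
        by_cases hjr : (j : Int) = r
        · have : j = r.toNat := by omega
          subst this
          rw [List.getElem?_eq_getElem hrn]
          simp [hec]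
        · exact hk4 j hj1 (by omega)

-- the inner swap loop of A: the element c at position j bubbles to position r in one block move
theorem pvBubble_go : ∀ (n : Nat) (j r : Int) (pre suf : List Char) (c : Char) (m : Int),
    (r - j).toNat = n → pre.length = j.toNat → 0 ≤ j → j ≤ r → r < (pre ++ c :: suf).length →
    (PySem.List.pyRange j r 1).foldl pvBubbleStep (pre ++ c :: suf, m)
      = (pre ++ suf.take (r - j).toNat ++ c :: suf.drop (r - j).toNat, m + (r - j)) := by
  intro n
  induction n with
  | zero =>
    intro j r pre suf c m hn hpre h0 hjr _hlen
    have : r = j := by omega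
    subst this
    rw [PySem.List.pyRange_one_eq_nil (by omega)]
    simp [List.foldl_nil]
  | succ n ih =>
    intro j r pre suf c m hn hpre h0 hjr hlen
    have hjr' : j < r := by omega
    rw [PySem.List.pyRange_one_cons hjr', List.foldl_cons]
    match suf with
    | [] =>
      exfalso
      simp at hlen
      omega
    | d :: suf' =>
      have hstep : pvBubbleStep (pre ++ c :: d :: suf', m) j
          = ((pre ++ [d]) ++ c :: suf', m + 1) := by
        unfold pvBubbleStep
        have h1 : PySem.List.slice (pre ++ c :: d :: suf') none (some j) = pre := by
          rw [PySem.List.slice_to _ (by omega : (0:Int) ≤ j)]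
          rw [← hpre, List.take_left]
        have h2 : PySem.List.pyGetD (pre ++ c :: d :: suf') (j + 1) ' ' = d := by
          rw [PySem.List.pyGetD_of_nonneg _ ' ' (by omega)]
          have he : (j + 1).toNat = pre.length + 1 := by omega
          rw [he, List.getD_eq_getElem _ ' ' (by simp)]
          simp
        have h3 : PySem.List.pyGetD (pre ++ c :: d :: suf') j ' ' = c := by
          rw [PySem.List.pyGetD_of_nonneg _ ' ' h0, ← hpre,
              List.getD_eq_getElem _ ' ' (by simp)]
          simp
        have h4 : PySem.List.slice (pre ++ c :: d :: suf') (some (j + 2)) none = suf' := by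
          rw [PySem.List.slice_from _ (by omega : (0:Int) ≤ j + 2)]
          have he : (j + 2).toNat = (pre ++ [c, d]).length := by simp; omega
          rw [he]
          have he2 : pre ++ c :: d :: suf' = (pre ++ [c, d]) ++ suf' := by simp
          rw [he2, List.drop_left]
        rw [h1, h2, h3, h4]
        simp
      rw [hstep]
      rw [ih (j + 1) r (pre ++ [d]) suf' c (m + 1) (by omega)
            (by simp; omega) (by omega) (by omega) (by simp at hlen ⊢; omega)]
      have htk : (d :: suf').take (r - j).toNat = d :: suf'.take (r - (j + 1)).toNat := by
        have he : (r - j).toNat = (r - (j + 1)).toNat + 1 := by omega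
        rw [he, List.take_succ_cons]
      have hdr : (d :: suf').drop (r - j).toNat = suf'.drop (r - (j + 1)).toNat := by
        have he : (r - j).toNat = (r - (j + 1)).toNat + 1 := by omega
        rw [he, List.drop_succ_cons]
      rw [htk, hdr, Prod.mk.injEq]
      exact ⟨by simp, by omega⟩

-- slice chars[1:-1] on a list of length ≥ 2
theorem pvSlice_one_negone (xs : List Char) (h : 2 ≤ xs.length) :
    PySem.List.slice xs (some 1) (some (-1)) = (xs.drop 1).take (xs.length - 2) := by
  simp only [PySem.List.slice, PySem.List.clampIdx]
  norm_num
  rw [if_neg (show ¬ xs = [] by intro hh; rw [hh] at h; simp at h),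
      show min 1 xs.length = 1 by omega, List.drop_one]
  congr 1
  omega

-- index congruence for getElem
theorem pvGetElem_idx_congr (l : List Char) {i j : Nat} (h : i = j) (hi : i < l.length)
    (hj : j < l.length) : l[i]'hi = l[j]'hj := by
  subst h; rfl

-- base case: window of size ≤ 1, both loops return the accumulator
theorem pvMain_base (cs : List Char) (m l r : Int) (h0 : 0 ≤ l) (h1 : -1 ≤ r)
    (h3 : ¬ l < r) :
    pvLoopA cs m l r = pvLoopB (PySem.List.slice cs (some l) (some (r + 1))) m := by
  rw [pvLoopA, dif_neg h3]
  refine (pvLoopB_small _ m ?_).symm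
  rw [PySem.List.slice_toNat _ h0 (by omega)]
  simp only [List.length_take, List.length_drop]
  omega

theorem pvMain : ∀ (n : Nat) (cs : List Char) (m l r : Int),
    (r - l).toNat ≤ n → 0 ≤ l → -1 ≤ r → r < cs.length →
    pvLoopA cs m l r = pvLoopB (PySem.List.slice cs (some l) (some (r + 1))) m := by
  intro n
  induction n with
  | zero =>
    intro cs m l r hn h0 h1 h2
    exact pvMain_base cs m l r h0 h1 (by omega)
  | succ n ih =>
    intro cs m l r hn h0 h1 h2
    by_cases hlt : l < r
    case neg => exact pvMain_base cs m l r h0 h1 hlt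
    case pos =>
    obtain ⟨a, rfl⟩ : ∃ a : Nat, l = (a : Int) := ⟨l.toNat, by omega⟩
    obtain ⟨b, rfl⟩ : ∃ b : Nat, r = (b : Int) := ⟨r.toNat, by omega⟩
    have hab : a < b := by exact_mod_cast hlt
    have hblen : b < cs.length := by exact_mod_cast h2
    -- the window
    have hW : PySem.List.slice cs (some (a : Int)) (some ((b : Int) + 1))
        = (cs.drop a).take (b + 1 - a) := by
      rw [show ((b : Int) + 1) = ((b + 1 : Nat) : Int) by push_cast; ring]
      rw [PySem.List.slice_natCast]
    rw [hW]
    set W : List Char := (cs.drop a).take (b + 1 - a) with hWdef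
    have hWlen : W.length = b + 1 - a := by
      simp only [hWdef, List.length_take, List.length_drop]
      omega
    have hWget : ∀ (j : Nat) (hj : j < W.length) (hj2 : a + j < cs.length),
        W[j]'hj = cs[a + j]'hj2 := by
      intro j hj hj2
      simp [hWdef, List.getElem_take, List.getElem_drop]
    have hWne : W ≠ [] := by
      intro h
      rw [h] at hWlen
      simp at hWlen
      omega
    -- element values at the two ends
    have hgl : PySem.List.pyGetD cs (a : Int) ' ' = cs[a]'(by omega) := by
      rw [PySem.List.pyGetD_natCast]
      exact List.getD_eq_getElem cs ' ' (by omega)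
    have hgr : PySem.List.pyGetD cs (b : Int) ' ' = cs[b]'hblen := by
      rw [PySem.List.pyGetD_natCast]
      exact List.getD_eq_getElem cs ' ' hblen
    have hW0 : PySem.List.pyGetD W 0 ' ' = cs[a]'(by omega) := by
      rw [PySem.List.pyGetD_zero, List.getD_eq_getElem _ _ (by omega)]
      have := hWget 0 (by omega) (by omega)
      simpa using this
    have hWlast : PySem.List.pyGetD W (-1) ' ' = cs[b]'hblen := by
      rw [PySem.List.pyGetD_neg_one W ' ' hWne, List.getLast_eq_getElem]
      have h := hWget (W.length - 1) (by omega) (by omega)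
      rw [h]
      congr 1
      omega
    rw [pvLoopA, dif_pos hlt, pvLoopB, dif_pos (by omega : 1 < W.length)]
    rw [hgl, hgr, hW0, hWlast]
    by_cases hceq : cs[a]'(by omega) = cs[b]'hblen
    · -- matching ends: both recurse on the window shrunk at both sides
      rw [if_pos (by simp [hceq]), if_pos (by simp [hceq])]
      have hrec := ih cs m ((a : Int) + 1) ((b : Int) - 1) (by omega) (by omega) (by omega)
        (by omega)
      rw [hrec]
      congr 1
      -- slice W [1:-1] = slice cs [a+1 : b]
      rw [pvSlice_one_negone W (by omega)]
      rw [show ((b : Int) - 1 + 1) = ((b : Nat) : Int) by ring]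
      rw [show ((a : Int) + 1) = ((a + 1 : Nat) : Int) by push_cast; ring]
      rw [PySem.List.slice_natCast]
      rw [hWdef, List.drop_take, List.drop_drop, List.take_take]
      congr 1
      simp only [List.length_take, List.length_drop]
      omega
    · -- unequal ends
      have hguard : ¬ (cs[a]'(by omega) == cs[b]'hblen) = true := by simp [hceq]
      rw [if_neg hguard, if_neg hguard]
      set c : Char := cs[a]'(by omega) with hcdef
      -- A's scan for the partner
      have hc? : cs[((a : Int)).toNat]? = some c := by
        rw [show ((a : Int)).toNat = a by omega, List.getElem?_eq_getElem (by omega)]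
      obtain ⟨kn, hfind, hk1, hk2, hk3, hk4⟩ :=
        pvFind_spec cs c (a : Int) (by omega) ((b : Int) - (a : Int)).toNat (b : Int)
          rfl (by omega) (by exact_mod_cast hblen) hc?
      have hka : a ≤ kn := by omega
      have hkc : cs[kn]'(by omega) = c := by
        rw [List.getElem?_eq_getElem (by omega : kn < cs.length)] at hk3
        exact Option.some.inj hk3
      have hkb : kn < b := by
        by_contra hcon
        have hknb : kn = b := by omega
        have h1 : cs[b]? = some c := by rw [← hknb]; exact hk3
        rw [List.getElem?_eq_getElem hblen] at h1
        exact hceq (Option.some.inj h1).symm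
      rw [hfind]
      rw [if_neg (show ¬ (((kn : Nat) : Int) == -1) = true by simp)]
      -- the bubble loop moves cs[kn] to position b
      have hsplit : cs = cs.take kn ++ cs[kn]'(by omega) :: cs.drop (kn + 1) := by
        conv_lhs => rw [← List.take_append_drop kn cs]
        rw [List.drop_eq_getElem_cons (by omega : kn < cs.length)]
      have hfold := pvBubble_go (b - kn) (kn : Int) (b : Int) (cs.take kn)
        (cs.drop (kn + 1)) (cs[kn]'(by omega)) m (by omega)
        (by simp [List.length_take]; omega) (by omega) (by omega)
        (by rw [← hsplit]; exact_mod_cast hblen)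
      rw [← hsplit] at hfold
      rw [hfold]
      set cs' : List Char := cs.take kn ++ (cs.drop (kn + 1)).take ((b : Int) - (kn : Int)).toNat
        ++ cs[kn]'(by omega) :: (cs.drop (kn + 1)).drop ((b : Int) - (kn : Int)).toNat with hcs'def
      have hcs'len : cs'.length = cs.length := by
        simp only [hcs'def, List.length_append, List.length_take, List.length_drop,
          List.length_cons]
        omega
      -- A recurses on (cs', a, b-1)
      have hrec := ih cs' (m + ((b : Int) - (kn : Int))) (a : Int) ((b : Int) - 1)
        (by omega) (by omega) (by omega) (by rw [hcs'len]; omega)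
      rw [hrec]
      -- B finds the same partner via reversed().index
      have hidx : PySem.List.index? W.reverse c = some (b - kn) := by
        show List.idxOf? c W.reverse = some (b - kn)
        rw [List.idxOf?_eq_some_iff]
        refine ⟨by simp only [List.length_reverse]; omega, ?_, ?_⟩
        · rw [List.getElem_reverse]
          exact ((hWget _ (by omega) (by omega)).trans
            ((pvGetElem_idx_congr cs (show a + (W.length - 1 - (b - kn)) = kn by omega)
              (by omega) (by omega)).trans hkc))
        · intro j hj
          rw [List.getElem_reverse]
          intro heq
          have h2 : cs[a + (W.length - 1 - j)]'(by omega) = c :=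
            (hWget _ (by omega) (by omega)).symm.trans heq
          apply hk4 (a + (W.length - 1 - j)) (by omega) (by push_cast; omega)
          rw [List.getElem?_eq_getElem (by omega)]
          exact congrArg some h2
      rw [hidx]
      simp only []
      -- the pop at index kn - a
      have hklt : kn - a < W.length := by omega
      have hkint : PySem.List.len W - 1 - ((b - kn : Nat) : Int) = ((kn - a : Nat) : Int) := by
        rw [PySem.List.len_eq, hWlen]
        omega
      rw [hkint, PySem.List.pop?_natCast W (kn - a) hklt]
      simp only []
      -- both sides are now pvLoopB applied to equal arguments
      congr 1
      · -- the remaining window of A equals B's window with index kn - a deleted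
        rw [List.eraseIdx_eq_take_drop_succ]
        rw [hcs'def, show ((b : Int) - (kn : Int)).toNat = b - kn by omega]
        rw [show ((b : Int) - 1 + 1) = ((b : Nat) : Int) by ring, PySem.List.slice_natCast]
        rw [List.drop_append, List.drop_append]
        rw [List.length_append, List.length_take, List.length_take, List.length_drop]
        rw [show min kn cs.length = kn by omega,
            show min (b - kn) (cs.length - (kn + 1)) = b - kn by omega]
        rw [show a - kn = 0 by omega, List.drop_zero,
            show a - (kn + (b - kn)) = 0 by omega, List.drop_zero]
        rw [List.take_left' (by
          simp only [List.length_append, List.length_take, List.length_drop]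
          omega)]
        congr 1
        · conv_rhs => rw [hWdef, List.take_take]
          rw [List.drop_take]
          congr 1
          omega
        · conv_rhs => rw [hWdef, List.drop_take, List.drop_drop]
          congr 1
          · omega
          · congr 1
            omega
      · rw [PySem.List.len_eq, hWlen]
        push_cast
        omega

-- ===== VERDICT (by name: the statement is the Claim_ definition above) =====
theorem min_moves_to_palindrome_spec : Claim_equal_min_moves_to_palindrome := by
  unfold Claim_equal_min_moves_to_palindrome
  intro s _
  unfold Spec_min_moves_to_palindrome min_moves_to_palindrome min_moves_to_palindrome_alt
  have h := pvMain (s.toList.length) s.toList 0 0 (PySem.Str.len s - 1) (by simp only [PySem.Str.len_eq]; omega) le_rfl (by simp only [PySem.Str.len_eq]; omega) (by simp only [PySem.Str.len_eq]; omega)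
  rw [h]
  congr 1
  rw [PySem.List.slice_toNat _ le_rfl (by simp only [PySem.Str.len_eq]; omega)]
  simp [PySem.Str.len_eq]
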